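-- pv_equiv track=rewrite | github.com/ekkamon/cs-01418112-python-lab | lab13/4.py | get_first_sunday_all_months
-- ===== SOURCE A (Python) =====
-- def get_max_day_by_month(month):
--   if month == 2:
--     return 28
--
--   return 31 if month in [1, 3, 5, 7, 8, 10, 12] else 30
--
-- def get_last_sunday(sunday, max_day):
--   for day in range(max_day, 1, -1):
--     if day % 7 == sunday % 7:
--       return day
--
-- def get_first_sunday(last_sunday, max_day):
--   return (last_sunday + 7) % max_day
--
-- def get_first_sunday_all_months(sunday):
--   data = [sunday]
--   months = [month for month in range(2, 13)]
--
--   last_sunday = get_last_sunday(sunday, 31)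
--   first_sunday = get_first_sunday(last_sunday, 31)
--
--   for month in months:
--     data.append(first_sunday)
--
--     max_day = get_max_day_by_month(month)
--     last_sunday = get_last_sunday(first_sunday, max_day)
--     first_sunday = get_first_sunday(last_sunday, max_day)
--
--   return data
-- ===== SOURCE B (Python) =====
-- def get_first_sunday_all_months(sunday):
--     # Same recurrence as A, but the inner downward scan for the last matching
--     # day is replaced by closed-form arithmetic: for max_day >= 8 the largest
--     # day in range with day % 7 == prev % 7 is max_day - (max_day - prev) % 7,
--     # and (that + 7) % max_day simplifies to 7 - (max_day - prev) % 7.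
--     data = [sunday]
--     prev = sunday
--     for max_day in [31, 28, 31, 30, 31, 30, 31, 31, 30, 31, 30]:
--         prev = 7 - (max_day - prev) % 7
--         data.append(prev)
--     return data
-- ===== Notes on version B (the rewrite author's own statement) =====
-- stated objective: simpler
-- what changed: The per-month downward scan for the last day with matching weekday residue is replaced by closed-form modular arithmetic (prev = 7 - (max_day - prev) % 7) folded over the fixed list of month lengths, eliminating the inner loop and all three helper functions.
import Mathlib
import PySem

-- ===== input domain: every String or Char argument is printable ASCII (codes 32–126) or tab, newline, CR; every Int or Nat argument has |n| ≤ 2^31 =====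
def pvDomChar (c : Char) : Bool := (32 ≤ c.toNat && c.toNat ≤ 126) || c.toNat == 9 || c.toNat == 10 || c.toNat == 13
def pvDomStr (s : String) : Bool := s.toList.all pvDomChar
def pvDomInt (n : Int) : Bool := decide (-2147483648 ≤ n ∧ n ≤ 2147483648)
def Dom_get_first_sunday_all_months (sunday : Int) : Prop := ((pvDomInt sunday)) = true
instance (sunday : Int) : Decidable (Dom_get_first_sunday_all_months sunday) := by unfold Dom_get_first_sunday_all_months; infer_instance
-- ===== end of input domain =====

-- B replaces A's per-month downward scan (and its helpers) by the closed-form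
-- step prev = 7 - (max_day - prev) % 7 folded over the fixed month lengths: simpler.

-- ===== PORT A =====
def pyGetMaxDayByMonth (month : Int) : Int :=
  if month == 2 then 28
  else if ([1, 3, 5, 7, 8, 10, 12] : List Int).contains month then 31 else 30

-- Python's for-loop with early return = first match; falling off the end = None.
def pyGetLastSunday (sunday max_day : Int) : Option Int :=
  (PySem.List.pyRange max_day 1 (-1)).find? (fun d => PySem.Int.mod d 7 == PySem.Int.mod sunday 7)

def pyGetFirstSunday (last_sunday max_day : Int) : Int :=
  PySem.Int.mod (last_sunday + 7) max_day

-- `.getD 0` discharges the Option: for the max_day values A uses (28/30/31) the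
-- scan over max_day..2 always finds a matching residue, so `none` is unreachable.
def get_first_sunday_all_months (sunday : Int) : List Int :=
  let last_sunday := (pyGetLastSunday sunday 31).getD 0
  let first_sunday := pyGetFirstSunday last_sunday 31
  ((PySem.List.pyRange 2 13 1).foldl
    (fun (st : List Int × Int) month =>
      (st.1 ++ [st.2],
       pyGetFirstSunday ((pyGetLastSunday st.2 (pyGetMaxDayByMonth month)).getD 0)
         (pyGetMaxDayByMonth month)))
    ([sunday], first_sunday)).1

-- ===== PORT B =====
def get_first_sunday_all_months_alt (sunday : Int) : List Int :=
  (([31, 28, 31, 30, 31, 30, 31, 31, 30, 31, 30] : List Int).foldl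
    (fun (st : List Int × Int) max_day =>
      (st.1 ++ [7 - PySem.Int.mod (max_day - st.2) 7],
       7 - PySem.Int.mod (max_day - st.2) 7))
    ([sunday], sunday)).1

-- ===== PRECONDITION & SPEC =====
def Spec_get_first_sunday_all_months (sunday : Int) (out : List Int) : Prop := out = get_first_sunday_all_months_alt sunday
instance (sunday : Int) (out : List Int) : Decidable (Spec_get_first_sunday_all_months sunday out) := by unfold Spec_get_first_sunday_all_months; infer_instance

-- ===== CLAIM (what is proved, stated in full; the proofs are below) =====
def Claim_equal_get_first_sunday_all_months : Prop := ∀ (sunday : Int), Dom_get_first_sunday_all_months sunday → Spec_get_first_sunday_all_months sunday (get_first_sunday_all_months sunday)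

-- ===== LEMMAS AND PROOFS =====

-- A fold whose step appends f st.2 m to the data list and replaces the seed by
-- g st.2 m: the data list splits off the initial segment.
lemma pvFoldlSnocSplit (f g : Int → Int → Int) :
    ∀ (l : List Int) (xs : List Int) (p : Int),
      (l.foldl (fun (st : List Int × Int) m => (st.1 ++ [f st.2 m], g st.2 m)) (xs, p)).1
        = xs ++ (l.foldl (fun (st : List Int × Int) m => (st.1 ++ [f st.2 m], g st.2 m)) ([], p)).1 := by
  intro l
  induction l with
  | nil => intro xs p; simp
  | cons a t ih =>
      intro xs p
      simp only [List.foldl_cons]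
      rw [ih (xs ++ [f p a]), ih ([] ++ [f p a])]
      simp

def pvTailA (q : Int) : List Int :=
  ((PySem.List.pyRange 2 13 1).foldl
    (fun (st : List Int × Int) month =>
      (st.1 ++ [st.2],
       pyGetFirstSunday ((pyGetLastSunday st.2 (pyGetMaxDayByMonth month)).getD 0)
         (pyGetMaxDayByMonth month)))
    ([], q)).1

def pvTailB (q : Int) : List Int :=
  (([31, 28, 31, 30, 31, 30, 31, 31, 30, 31, 30] : List Int).foldl
    (fun (st : List Int × Int) max_day =>
      (st.1 ++ [7 - PySem.Int.mod (max_day - st.2) 7],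
       7 - PySem.Int.mod (max_day - st.2) 7))
    ([], q)).1

lemma pvASplit (s : Int) :
    get_first_sunday_all_months s
      = s :: pvTailA (pyGetFirstSunday ((pyGetLastSunday s 31).getD 0) 31) := by
  unfold get_first_sunday_all_months pvTailA
  rw [pvFoldlSnocSplit (fun p _ => p)
        (fun p m => pyGetFirstSunday ((pyGetLastSunday p (pyGetMaxDayByMonth m)).getD 0)
          (pyGetMaxDayByMonth m))]
  simp

lemma pvBSplit (s : Int) :
    get_first_sunday_all_months_alt s = s :: pvTailB s := by
  unfold get_first_sunday_all_months_alt pvTailB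
  rw [pvFoldlSnocSplit (fun p m => 7 - PySem.Int.mod (m - p) 7)
        (fun p m => 7 - PySem.Int.mod (m - p) 7)]
  simp

lemma pvGetLastSundayMod (s m : Int) :
    pyGetLastSunday s m = pyGetLastSunday (s % 7) m := by
  unfold pyGetLastSunday
  congr 1
  funext d
  rw [PySem.Int.mod_eq_emod_of_pos (a := s) (by norm_num),
      PySem.Int.mod_eq_emod_of_pos (a := s % 7) (by norm_num),
      ]
  congr 1
  omega

lemma pvTailBMod (s : Int) : pvTailB s = pvTailB (s % 7) := by
  unfold pvTailB
  simp only [List.foldl_cons]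
  have h : (7 : Int) - PySem.Int.mod (31 - s) 7 = 7 - PySem.Int.mod (31 - s % 7) 7 := by
    rw [PySem.Int.mod_eq_emod_of_pos (by norm_num),
        PySem.Int.mod_eq_emod_of_pos (by norm_num),
        Int.sub_emod 31 s 7, Int.sub_emod 31 (s % 7) 7,
        Int.emod_emod_of_dvd s (dvd_refl 7)]
  rw [h]

-- ===== VERDICT (by name: the statement is the Claim_ definition above) =====
theorem get_first_sunday_all_months_spec : Claim_equal_get_first_sunday_all_months := by
  intro s _
  unfold Spec_get_first_sunday_all_months
  rw [pvASplit, pvBSplit, pvGetLastSundayMod, pvTailBMod]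
  have h : s % 7 = 0 ∨ s % 7 = 1 ∨ s % 7 = 2 ∨ s % 7 = 3 ∨ s % 7 = 4 ∨ s % 7 = 5 ∨ s % 7 = 6 := by
    omega
  rcases h with h | h | h | h | h | h | h <;> rw [h] <;>
    exact congrArg (fun t => s :: t) (by decide)
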